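-- pv_equiv track=rewrite | github.com/PyAirtableMCP/pyairtable-compose | tests/security/comprehensive_security_test_suite.py | get_priority_from_issue
-- ===== SOURCE A (Python) =====
-- def get_priority_from_issue(issue: str) -> str:
--     """Determine priority level based on issue description"""
--     high_priority_keywords = ["authentication", "authorization", "injection", "token", "password"]
--     medium_priority_keywords = ["header", "encryption", "session"]
--
--     issue_lower = issue.lower()
--
--     if any(keyword in issue_lower for keyword in high_priority_keywords):
--         return "HIGH"
--     elif any(keyword in issue_lower for keyword in medium_priority_keywords):
--         return "MEDIUM"
--     else:
--         return "LOW"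
-- ===== SOURCE B (Python) =====
-- def get_priority_from_issue(issue: str) -> str:
--     """Determine priority level based on issue description"""
--     HIGH = ("authentication", "authorization", "injection", "token", "password")
--     MEDIUM = ("header", "encryption", "session")
--     s = issue.lower()
--     medium_seen = False
--     for i in range(len(s) + 1):
--         rest = s[i:]
--         if any(rest.startswith(kw) for kw in HIGH):
--             return "HIGH"
--         if any(rest.startswith(kw) for kw in MEDIUM):
--             medium_seen = True
--     return "MEDIUM" if medium_seen else "LOW"
-- ===== Notes on version B (the rewrite author's own statement) =====
-- stated objective: alternative
-- what changed: Replaces the per-keyword library substring-containment tests with a single left-to-right scan over the string's positions doing explicit prefix matching (naive string search), returning HIGH eagerly on the first high-keyword hit and carrying a medium-seen flag to the end; in interpreted Python this trades the fast built-in search for an explicit per-position loop.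
import Mathlib
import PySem

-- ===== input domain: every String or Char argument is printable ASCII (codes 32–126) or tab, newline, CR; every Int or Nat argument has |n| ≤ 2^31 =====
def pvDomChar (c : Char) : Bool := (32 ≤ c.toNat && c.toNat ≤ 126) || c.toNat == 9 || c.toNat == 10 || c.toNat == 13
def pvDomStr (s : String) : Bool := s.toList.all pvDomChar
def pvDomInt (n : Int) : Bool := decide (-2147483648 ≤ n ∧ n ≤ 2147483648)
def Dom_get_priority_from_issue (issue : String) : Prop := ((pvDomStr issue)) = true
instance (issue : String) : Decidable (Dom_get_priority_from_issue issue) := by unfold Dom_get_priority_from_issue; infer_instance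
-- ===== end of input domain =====

-- B replaces A's per-keyword substring searches by one left-to-right scan over the string's
-- positions with explicit prefix matching (naive string search), eager HIGH return and a
-- medium-seen flag (alternative decomposition; no speed claimed).

-- ===== PORT A =====
def get_priority_from_issue (issue : String) : String :=
  let high_priority_keywords := ["authentication", "authorization", "injection", "token", "password"]
  let medium_priority_keywords := ["header", "encryption", "session"]
  let issue_lower := PySem.Str.lower issue
  if high_priority_keywords.any (fun kw => PySem.Str.isIn kw issue_lower) then "HIGH"
  else if medium_priority_keywords.any (fun kw => PySem.Str.isIn kw issue_lower) then "MEDIUM"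
  else "LOW"

-- ===== PORT B =====
def pvHighKws : List String := ["authentication", "authorization", "injection", "token", "password"]
def pvMedKws : List String := ["header", "encryption", "session"]

-- the Python loop over i in range(len(s)+1): each iteration looks at the suffix s[i:];
-- early 'return "HIGH"', otherwise the medium_seen flag is threaded to the next iteration
def pvScan : List Char → Bool → String
  | s, medium_seen =>
    if pvHighKws.any (fun kw => PySem.Chars.startswith s kw.toList) then "HIGH"
    else
      let medium_seen' :=
        if pvMedKws.any (fun kw => PySem.Chars.startswith s kw.toList) then true else medium_seen
      match s with
      | [] => if medium_seen' then "MEDIUM" else "LOW"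
      | _ :: t => pvScan t medium_seen'

def get_priority_from_issue_alt (issue : String) : String :=
  pvScan (PySem.Str.lower issue).toList false

-- ===== PRECONDITION & SPEC =====
def Spec_get_priority_from_issue (issue : String) (out : String) : Prop := out = get_priority_from_issue_alt issue
instance (issue : String) (out : String) : Decidable (Spec_get_priority_from_issue issue out) := by unfold Spec_get_priority_from_issue; infer_instance

-- ===== CLAIM =====
def Claim_equal_get_priority_from_issue : Prop := ∀ (issue : String), Dom_get_priority_from_issue issue → Spec_get_priority_from_issue issue (get_priority_from_issue issue)

-- ===== LEMMAS AND PROOFS =====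

-- substring occurs in a::t iff it is a prefix there or occurs in t
theorem pv_isIn_cons (kw : List Char) (a : Char) (t : List Char) :
    PySem.Chars.isIn kw (a :: t)
      = (PySem.Chars.startswith (a :: t) kw || PySem.Chars.isIn kw t) := by
  rw [Bool.eq_iff_iff]
  simp [PySem.Chars.isIn_iff_infix, PySem.Chars.startswith_iff, List.infix_cons_iff]

theorem pv_isIn_nil_eq (kw : List Char) :
    PySem.Chars.isIn kw [] = PySem.Chars.startswith [] kw := by
  rw [Bool.eq_iff_iff]
  simp [PySem.Chars.isIn_iff_infix, PySem.Chars.startswith_iff]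

theorem pv_any_or (L : List String) (p q : String → Bool) :
    L.any (fun kw => p kw || q kw) = (L.any p || L.any q) := by
  induction L with
  | nil => rfl
  | cons k L ih =>
    simp only [List.any_cons, ih]
    ac_rfl

theorem pv_any_isIn_cons (L : List String) (a : Char) (t : List Char) :
    L.any (fun kw => PySem.Chars.isIn kw.toList (a :: t))
      = (L.any (fun kw => PySem.Chars.startswith (a :: t) kw.toList)
          || L.any (fun kw => PySem.Chars.isIn kw.toList t)) := by
  simp only [pv_isIn_cons]
  exact pv_any_or L _ _

theorem pv_any_isIn_nil (L : List String) :
    L.any (fun kw => PySem.Chars.isIn kw.toList [])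
      = L.any (fun kw => PySem.Chars.startswith [] kw.toList) := by
  simp only [pv_isIn_nil_eq]

theorem pv_if_shuffle (sh ht med sm mt : Bool) :
    (if (sh || ht) = true then ("HIGH" : String)
     else if (med || (sm || mt)) = true then "MEDIUM" else "LOW")
    = (if sh = true then "HIGH"
       else if ht = true then "HIGH"
       else if ((if sm = true then true else med) || mt) = true then "MEDIUM" else "LOW") := by
  revert sh ht med sm mt; decide

-- pvScan computes the same tiered classification as the two substring scans
theorem pv_scan_eq (s : List Char) (med : Bool) :
    pvScan s med
      = (if pvHighKws.any (fun kw => PySem.Chars.isIn kw.toList s) then "HIGH"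
         else if (med || pvMedKws.any (fun kw => PySem.Chars.isIn kw.toList s)) then "MEDIUM"
         else "LOW") := by
  induction s generalizing med with
  | nil =>
    rw [pvScan]
    simp only [pv_any_isIn_nil]
    cases pvHighKws.any (fun kw => PySem.Chars.startswith [] kw.toList) <;>
      cases pvMedKws.any (fun kw => PySem.Chars.startswith [] kw.toList) <;>
      cases med <;> simp
  | cons a t ih =>
    rw [pvScan]
    simp only [pv_any_isIn_cons, ih]
    exact (pv_if_shuffle _ _ _ _ _).symm

theorem pv_str_isIn (kw s : String) :
    PySem.Str.isIn kw s = PySem.Chars.isIn kw.toList s.toList := by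
  simp [PySem.Str.isIn_eq]

-- ===== VERDICT =====
theorem get_priority_from_issue_spec : Claim_equal_get_priority_from_issue := by
  intro issue _
  unfold Spec_get_priority_from_issue get_priority_from_issue get_priority_from_issue_alt
  rw [pv_scan_eq]
  simp only [pvHighKws, pvMedKws, pv_str_isIn, Bool.false_or]
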